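-- pv_equiv track=rewrite | github.com/alexdeharo269/tfg | number changes in i positoin.py | count_column_changes
-- ===== SOURCE A (Python) =====
-- def count_column_changes(matrix):
--     num_columns = len(matrix[0])
--     changes = []
--     for col in range(num_columns):
--         count = 0
--         for row in range(1, len(matrix)):
--             if matrix[row][col] != matrix[row - 1][col]:
--                 count += 1
--         changes.append((col, count))
--     return changes
-- ===== SOURCE B (Python) =====
-- def count_column_changes(matrix):
--     prev = matrix[0]
--     num_columns = len(prev)
--     counts = [0] * num_columns
--     for row in matrix[1:]:
--         counts = [counts[col] + (row[col] != prev[col]) for col in range(num_columns)]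
--         prev = row
--     return list(enumerate(counts))
-- ===== Notes on version B (the rewrite author's own statement) =====
-- stated objective: alternative
-- what changed: Replaces A's column-major double scan (for each column, re-scan all rows) by a single row-major streaming pass keeping a previous-row reference and a counts vector, finishing with enumerate; Pre_ excludes inputs where A raises IndexError (empty matrix or a row shorter than the first row).
import Mathlib
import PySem

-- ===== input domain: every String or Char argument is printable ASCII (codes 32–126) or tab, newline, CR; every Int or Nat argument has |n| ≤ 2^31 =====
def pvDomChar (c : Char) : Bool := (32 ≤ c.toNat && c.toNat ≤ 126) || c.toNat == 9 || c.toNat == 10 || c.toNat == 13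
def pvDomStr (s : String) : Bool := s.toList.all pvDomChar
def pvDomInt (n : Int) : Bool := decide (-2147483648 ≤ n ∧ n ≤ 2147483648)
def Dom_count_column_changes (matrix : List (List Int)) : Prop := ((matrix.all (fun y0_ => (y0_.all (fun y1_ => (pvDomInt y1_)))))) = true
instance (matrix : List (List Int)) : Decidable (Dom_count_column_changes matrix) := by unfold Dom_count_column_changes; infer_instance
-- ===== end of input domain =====

-- B replaces A's column-major rescans by a single row-major pass (prev row + counts vector);
-- equivalence is proved on the inputs where A's Python does not raise.

-- ===== PORT A =====
def count_column_changes (matrix : List (List Int)) : List (Int × Int) :=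
  let num_columns : Int := PySem.List.len (PySem.List.pyGetD matrix 0 [])
  (PySem.List.pyRange 0 num_columns).foldl
    (fun changes col =>
      let count : Int := (PySem.List.pyRange 1 (PySem.List.len matrix)).foldl
        (fun count row =>
          if PySem.List.pyGetD (PySem.List.pyGetD matrix row []) col 0
              ≠ PySem.List.pyGetD (PySem.List.pyGetD matrix (row - 1) []) col 0
          then count + 1 else count) 0
      changes ++ [(col, count)]) []

-- ===== PORT B =====
def count_column_changes_alt (matrix : List (List Int)) : List (Int × Int) :=
  let prev : List Int := PySem.List.pyGetD matrix 0 []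
  let num_columns : Int := PySem.List.len prev
  let counts : List Int := List.replicate num_columns.toNat 0
  let st := (PySem.List.slice matrix (some 1) none).foldl
    (fun (st : List Int × List Int) row =>
      (row, (PySem.List.pyRange 0 num_columns).map
        (fun col => PySem.List.pyGetD st.2 col 0 +
          (if PySem.List.pyGetD row col 0 ≠ PySem.List.pyGetD st.1 col 0 then (1:Int) else 0))))
    (prev, counts)
  ((List.range st.2.length).zip st.2).map (fun p => ((p.1 : Int), p.2))

-- ===== PRECONDITION & SPEC =====
-- Pre_ excludes exactly the inputs on which Python A raises IndexError:
-- the empty matrix (matrix[0]) and matrices with some row shorter than the first row.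
def Pre_count_column_changes (matrix : List (List Int)) : Prop :=
  matrix ≠ [] ∧ ∀ row ∈ matrix, (matrix.headD []).length ≤ row.length
instance (matrix : List (List Int)) : Decidable (Pre_count_column_changes matrix) := by
  unfold Pre_count_column_changes; infer_instance
def pvWitness_count_column_changes : List (List Int) := [[1, 2], [1, 3], [0, 3]]

def Spec_count_column_changes (matrix : List (List Int)) (out : List (Int × Int)) : Prop := out = count_column_changes_alt matrix
instance (matrix : List (List Int)) (out : List (Int × Int)) : Decidable (Spec_count_column_changes matrix out) := by unfold Spec_count_column_changes; infer_instance

-- ===== CLAIM (what is proved, stated in full; the proofs are below) =====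
def Claim_equal_count_column_changes : Prop := ∀ (matrix : List (List Int)), Dom_count_column_changes matrix → Pre_count_column_changes matrix → Spec_count_column_changes matrix (count_column_changes matrix)

-- ===== LEMMAS AND PROOFS =====

-- number of adjacent changes at column c along the row list p :: l
def pvCnt : List Int → List (List Int) → Nat → Int
  | _, [], _ => 0
  | p, r :: l, c => (if r.getD c 0 ≠ p.getD c 0 then (1 : Int) else 0) + pvCnt r l c

lemma pyRange_one_shift (L : Nat) :
    PySem.List.pyRange 1 ((L + 1 : Nat) : Int) = (List.range L).map (fun i => (((i + 1 : Nat)) : Int)) := by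
  have h0 : (0 : Int) < ((L + 1 : Nat) : Int) := by positivity
  have h := PySem.List.pyRange_zero_natCast (L + 1)
  rw [PySem.List.pyRange_one_cons h0, List.range_succ_eq_map, List.map_cons, List.map_map] at h
  have := congrArg List.tail h
  simpa using this

lemma cnt_index (rest : List (List Int)) : ∀ (r0 : List Int) (c : Nat),
    ((List.range rest.length).countP
      (fun i => decide ((rest.getD i []).getD c 0 ≠ (((r0 :: rest).getD i []).getD c 0))) : Int)
      = pvCnt r0 rest c := by
  induction rest with
  | nil => intro r0 c; simp [pvCnt]
  | cons r l ih =>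
    intro r0 c
    rw [List.length_cons, List.range_succ_eq_map, List.countP_cons, List.countP_map]
    simp only [Function.comp_def, List.getD_cons_succ, List.getD_cons_zero]
    push_cast
    rw [ih r c]
    simp only [pvCnt, List.getD_eq_getElem?_getD, ne_eq, decide_eq_true_eq, ite_not]
    ring

lemma zip_range_map {γ : Type} (g : Nat → γ) (n : Nat) :
    (List.range n).zip ((List.range n).map g) = (List.range n).map (fun a => (a, g a)) := by
  apply List.ext_getElem
  · simp
  · intro i h1 h2
    simp

lemma A_char (r0 : List Int) (rest : List (List Int)) :
    count_column_changes (r0 :: rest)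
      = (List.range r0.length).map (fun (c : Nat) => ((c : Int), pvCnt r0 rest c)) := by
  simp only [count_column_changes, PySem.List.pyGetD_zero_cons, PySem.List.len_eq,
    List.length_cons]
  rw [PySem.List.foldl_append_singleton_eq_map, PySem.List.pyRange_zero_natCast, List.map_map]
  simp only [List.nil_append, Function.comp_def]
  refine List.map_congr_left (fun c _ => ?_)
  have hP : (fun (count : Int) (i : Nat) =>
        if PySem.List.pyGetD (PySem.List.pyGetD (r0 :: rest) (((i + 1 : Nat)) : Int) []) ((c : Nat) : Int) 0
            ≠ PySem.List.pyGetD (PySem.List.pyGetD (r0 :: rest) ((((i + 1 : Nat)) : Int) - 1) []) ((c : Nat) : Int) 0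
        then count + 1 else count)
      = (fun (count : Int) (i : Nat) =>
          if (fun i : Nat => decide ((rest.getD i []).getD c 0 ≠ (((r0 :: rest).getD i []).getD c 0))) i = true
          then count + 1 else count) := by
    funext count i
    have h1 : ((((i + 1 : Nat)) : Int)) - 1 = ((i : Nat) : Int) := by push_cast; ring
    rw [h1]
    simp only [PySem.List.pyGetD_natCast, List.getD_cons_succ, ne_eq, decide_eq_true_eq]
  rw [pyRange_one_shift rest.length, List.foldl_map, hP, PySem.List.foldl_count_if,
    cnt_index rest r0 c, zero_add]

lemma B_inv (l : List (List Int)) : ∀ (p : List Int) (n : Nat) (f : Nat → Int),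
    ((l.foldl (fun (st : List Int × List Int) row =>
        (row, (PySem.List.pyRange 0 (n : Int)).map
          (fun col => PySem.List.pyGetD st.2 col 0 +
            (if PySem.List.pyGetD row col 0 ≠ PySem.List.pyGetD st.1 col 0 then (1:Int) else 0))))
      (p, (List.range n).map f)).2)
      = (List.range n).map (fun c => f c + pvCnt p l c) := by
  induction l with
  | nil => intro p n f; simp [pvCnt]
  | cons r l ih =>
    intro p n f
    rw [List.foldl_cons]
    have hstate :
        (PySem.List.pyRange 0 (n : Int)).map
          (fun col => PySem.List.pyGetD ((List.range n).map f) col 0 +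
            (if PySem.List.pyGetD r col 0 ≠ PySem.List.pyGetD p col 0 then (1:Int) else 0))
        = (List.range n).map
            (fun c => f c + (if r.getD c 0 ≠ p.getD c 0 then (1:Int) else 0)) := by
      rw [PySem.List.pyRange_zero_natCast, List.map_map]
      refine List.map_congr_left (fun c hc => ?_)
      have hcn : c < n := List.mem_range.mp hc
      simp [PySem.List.pyGetD_natCast, List.getD_eq_getElem?_getD, hcn]
    rw [hstate, ih]
    refine List.map_congr_left (fun c _ => ?_)
    simp [pvCnt, add_assoc]

lemma B_char (r0 : List Int) (rest : List (List Int)) :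
    count_column_changes_alt (r0 :: rest)
      = (List.range r0.length).map (fun (c : Nat) => ((c : Int), pvCnt r0 rest c)) := by
  simp only [count_column_changes_alt, PySem.List.pyGetD_zero_cons, PySem.List.len_eq]
  have hslice : PySem.List.slice (r0 :: rest) (some 1) none = rest := by
    simp [PySem.List.slice]
  have hrep : List.replicate ((r0.length : Int)).toNat (0 : Int)
      = (List.range r0.length).map (fun _ => (0 : Int)) := by
    simp [List.map_const']
  rw [hslice, hrep]
  rw [B_inv rest r0 r0.length (fun _ => 0)]
  rw [List.length_map, List.length_range, zip_range_map, List.map_map]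
  refine List.map_congr_left (fun c _ => ?_)
  simp

-- ===== VERDICT (by name: the statement is the Claim_ definition above) =====
theorem count_column_changes_spec : Claim_equal_count_column_changes := by
  intro matrix _ hpre
  obtain ⟨hne, -⟩ := hpre
  unfold Spec_count_column_changes
  cases matrix with
  | nil => exact absurd rfl hne
  | cons r0 rest => rw [A_char, B_char]
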